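-- pv_equiv track=rewrite | github.com/NOPLAB/crane_x7_vla | ros2/src/crane_x7_vla/crane_x7_vla/vla_inference_node.py | _is_huggingface_hub_id
-- ===== SOURCE A (Python) =====
-- def _is_huggingface_hub_id(path: str) -> bool:
--     """Check if path looks like a HuggingFace Hub model ID (e.g., 'username/model-name')."""
--     # HF Hub IDs have format: org/model or user/model
--     # Local paths start with / or ./ or contain backslashes on Windows
--     if not path:
--         return False
--     if path.startswith('/') or path.startswith('./') or path.startswith('..'):
--         return False
--     if '\\' in path:  # Windows path
--         return False
--     # Check if it looks like a HF Hub ID (contains exactly one /)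
--     parts = path.split('/')
--     return len(parts) == 2 and all(p for p in parts)
-- ===== SOURCE B (Python) =====
-- def _is_huggingface_hub_id(path: str) -> bool:
--     """Single left-to-right scan: reject './'/'..' prefixes, then walk the
--     characters once counting the two segment lengths around one '/'."""
--     if path[:2] in ('./', '..'):
--         return False
--     seen = False
--     n1 = n2 = 0
--     for c in path:
--         if c == '\\':
--             return False
--         if c == '/':
--             if seen or n1 == 0:
--                 return False
--             seen = True
--         elif seen:
--             n2 += 1
--         else:
--             n1 += 1
--     return seen and n2 > 0
-- ===== Notes on version B (the rewrite author's own statement) =====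
-- stated objective: alternative
-- what changed: Replaced the chain of prefix guards, the substring test and the split-into-parts check by one left-to-right character scan that tracks the lengths of the two segments around the single separating slash, after one check of the first two characters.
import Mathlib
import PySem

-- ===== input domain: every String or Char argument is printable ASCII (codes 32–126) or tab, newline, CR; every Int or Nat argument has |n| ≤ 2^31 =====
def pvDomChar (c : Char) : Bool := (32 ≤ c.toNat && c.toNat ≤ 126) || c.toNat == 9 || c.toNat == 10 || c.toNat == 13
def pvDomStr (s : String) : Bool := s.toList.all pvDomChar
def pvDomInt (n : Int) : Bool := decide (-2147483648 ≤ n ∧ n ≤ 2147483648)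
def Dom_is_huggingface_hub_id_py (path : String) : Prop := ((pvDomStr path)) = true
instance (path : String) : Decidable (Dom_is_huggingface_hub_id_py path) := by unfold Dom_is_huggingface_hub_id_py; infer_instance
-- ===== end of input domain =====

-- B replaces A's startswith-guard chain + substring test + split('/')-parts check by a single
-- left-to-right character scan after one check of the first two characters; objective: alternative.

-- ===== PORT A =====
def is_huggingface_hub_id_py (path : String) : Bool :=
  if path = "" then false
  else if PySem.Str.startswith path "/" || PySem.Str.startswith path "./" || PySem.Str.startswith path ".." then false
  else if PySem.Str.isIn "\\" path then false
  else
    -- parts = path.split('/'); len(parts) == 2 and all(p for p in parts)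
    let parts := PySem.Chars.splitOn path.toList ['/']
    decide (parts.length = 2) && parts.all (fun p => !(decide (p = [])))

-- ===== PORT B =====
-- the for-loop of Source B: state (seen, n1, n2); Source B's early `return False` becomes `false`
def altScan : List Char → Bool → Nat → Nat → Bool
  | [], seen, _, n2 => seen && decide (0 < n2)
  | c :: rest, seen, n1, n2 =>
    if c = '\\' then false
    else if c = '/' then
      if seen || decide (n1 = 0) then false else altScan rest true n1 n2
    else if seen then altScan rest seen n1 (n2 + 1)
    else altScan rest false (n1 + 1) n2

def is_huggingface_hub_id_py_alt (path : String) : Bool :=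
  -- path[:2] in ('./', '..')  (a nonnegative slice from 0 is List.take; exact)
  let p2 := path.toList.take 2
  if p2 = ['.', '/'] || p2 = ['.', '.'] then false
  else altScan path.toList false 0 0

-- ===== PRECONDITION & SPEC =====
def Spec_is_huggingface_hub_id_py (path : String) (out : Bool) : Prop := out = is_huggingface_hub_id_py_alt path
instance (path : String) (out : Bool) : Decidable (Spec_is_huggingface_hub_id_py path out) := by unfold Spec_is_huggingface_hub_id_py; infer_instance

-- ===== CLAIM (what is proved, stated in full; the proofs are below) =====
def Claim_equal_is_huggingface_hub_id_py : Prop := ∀ (path : String), Dom_is_huggingface_hub_id_py path → Spec_is_huggingface_hub_id_py path (is_huggingface_hub_id_py path)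

-- ===== LEMMAS AND PROOFS =====

def splitSlash (pre : List Char) : List Char → List (List Char)
  | [] => [pre]
  | c :: r => if c = '/' then pre :: splitSlash [] r else splitSlash (pre ++ [c]) r

def hasGoodSplit : List Char → Bool
  | [] => false
  | c :: r => if c = '/' then decide (r ≠ [] ∧ '/' ∉ r) else hasGoodSplit r

lemma splitOn_go_eq (l : List Char) : ∀ (fuel : Nat) (cur : List Char) (acc : List (List Char)),
    l.length < fuel →
    PySem.Chars.splitOn.go ['/'] fuel l cur acc = acc.reverse ++ splitSlash cur.reverse l := by
  induction l with
  | nil =>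
    intro fuel cur acc h
    obtain ⟨f, rfl⟩ : ∃ f, fuel = f + 1 := ⟨fuel - 1, by omega⟩
    rw [PySem.Chars.splitOn.go] <;> simp [splitSlash]
  | cons c rest ih =>
    intro fuel cur acc h
    obtain ⟨f, rfl⟩ : ∃ f, fuel = f + 1 := ⟨fuel - 1, by omega⟩
    have hf : rest.length < f := by simp at h; omega
    rw [PySem.Chars.splitOn.go]
    · by_cases hc : c = '/'
      · simp [List.isPrefixOf, hc, ih f _ _ hf, splitSlash]
      · simp [List.isPrefixOf, hc, Ne.symm hc, ih f _ _ hf, splitSlash]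

lemma splitOn_eq_splitSlash (cs : List Char) :
    PySem.Chars.splitOn cs ['/'] = splitSlash [] cs := by
  have := splitOn_go_eq cs (cs.length + 1) [] [] (by omega)
  simpa [PySem.Chars.splitOn] using this

lemma splitSlash_length_pos (cs : List Char) : ∀ pre, 0 < (splitSlash pre cs).length := by
  induction cs with
  | nil => intro pre; simp [splitSlash]
  | cons c r ih => intro pre; by_cases hc : c = '/' <;> simp [splitSlash, hc, ih]

lemma splitSlash_no_slash (cs : List Char) : '/' ∉ cs → ∀ pre, splitSlash pre cs = [pre ++ cs] := by
  induction cs with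
  | nil => intro _ pre; simp [splitSlash]
  | cons c r ih =>
    intro h pre
    have hc : c ≠ '/' := fun hh => h (by simp [hh])
    simp [splitSlash, hc, ih (fun hh => h (by simp [hh]))]

lemma splitSlash_len_ge (cs : List Char) : '/' ∈ cs → ∀ pre, 2 ≤ (splitSlash pre cs).length := by
  induction cs with
  | nil => simp
  | cons c r ih =>
    intro h pre
    by_cases hc : c = '/'
    · have := splitSlash_length_pos r []
      simp [splitSlash, hc]; omega
    · have hr : '/' ∈ r := by
        rcases List.mem_cons.mp h with h1 | h1
        · exact absurd h1.symm hc
        · exact h1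
      have := ih hr (pre ++ [c])
      simpa [splitSlash, hc] using this

def gS (pre cs : List Char) : Bool :=
  decide ((splitSlash pre cs).length = 2) && (splitSlash pre cs).all (fun p => !(decide (p = [])))

lemma gS_eq_hasGoodSplit (cs : List Char) : ∀ pre, pre ≠ [] → gS pre cs = hasGoodSplit cs := by
  induction cs with
  | nil => intro pre _; simp [gS, splitSlash, hasGoodSplit]
  | cons c r ih =>
    intro pre hpre
    by_cases hc : c = '/'
    · by_cases hr : '/' ∈ r
      · have := splitSlash_len_ge r hr []
        simp [gS, splitSlash, hc, hr, hasGoodSplit]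
        omega
      · by_cases hre : r = []
        · simp [gS, splitSlash, hc, hre, hasGoodSplit]
        · simp [gS, splitSlash, hc, splitSlash_no_slash r hr, hr, hre, hpre, hasGoodSplit]
    · simp only [gS, splitSlash, hc, hasGoodSplit]
      exact ih (pre ++ [c]) (by simp)

lemma altScan_backslash (cs : List Char) : '\\' ∈ cs →
    ∀ seen n1 n2, altScan cs seen n1 n2 = false := by
  induction cs with
  | nil => simp
  | cons c rest ih =>
    intro h seen n1 n2
    by_cases hb : c = '\\'
    · simp [altScan, hb]
    · have hr : '\\' ∈ rest := by
        rcases List.mem_cons.mp h with h1 | h1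
        · exact absurd h1.symm hb
        · exact h1
      by_cases hc : c = '/'
      · by_cases hs : seen || decide (n1 = 0)
        · simp [altScan, hc, hs]
        · simp [altScan, hc, hs, ih hr]
      · cases seen <;> simp [altScan, hb, hc, ih hr]

lemma altScan_seen_pos (cs : List Char) : '\\' ∉ cs →
    ∀ n1 n2, altScan cs true n1 (n2 + 1) = decide ('/' ∉ cs) := by
  induction cs with
  | nil => simp [altScan]
  | cons c rest ih =>
    intro h n1 n2
    have hb : c ≠ '\\' := fun hh => h (by simp [hh])
    have hr : '\\' ∉ rest := fun hh => h (by simp [hh])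
    by_cases hc : c = '/'
    · simp [altScan, hc]
    · simp [altScan, hb, hc, Ne.symm hc, ih hr]

lemma altScan_seen_zero (cs : List Char) : '\\' ∉ cs →
    ∀ n1, altScan cs true n1 0 = decide (cs ≠ [] ∧ '/' ∉ cs) := by
  cases cs with
  | nil => intro h n1; simp [altScan]
  | cons c rest =>
    intro h n1
    have hb : c ≠ '\\' := fun hh => h (by simp [hh])
    have hr : '\\' ∉ rest := fun hh => h (by simp [hh])
    by_cases hc : c = '/'
    · simp [altScan, hc]
    · simp [altScan, hb, hc, Ne.symm hc, altScan_seen_pos rest hr n1 0]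

lemma altScan_phase1 (cs : List Char) : '\\' ∉ cs →
    ∀ n1, altScan cs false (n1 + 1) 0 = hasGoodSplit cs := by
  induction cs with
  | nil => intro h n1; simp [altScan, hasGoodSplit]
  | cons c rest ih =>
    intro h n1
    have hb : c ≠ '\\' := fun hh => h (by simp [hh])
    have hr : '\\' ∉ rest := fun hh => h (by simp [hh])
    by_cases hc : c = '/'
    · simp [altScan, hasGoodSplit, hc, altScan_seen_zero rest hr]
    · simp [altScan, hasGoodSplit, hb, hc, ih hr]


lemma altScan_eq (cs : List Char) (h : '\\' ∉ cs) : altScan cs false 0 0 = gS [] cs := by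
  cases cs with
  | nil => simp [altScan, gS, splitSlash]
  | cons c rest =>
    have hb : c ≠ '\\' := fun hh => h (by simp [hh])
    have hr : '\\' ∉ rest := fun hh => h (by simp [hh])
    by_cases hc : c = '/'
    · simp [altScan, hc, gS, splitSlash]
    · rw [show gS [] (c :: rest) = gS [c] rest by simp [gS, splitSlash, hc]]
      rw [gS_eq_hasGoodSplit rest [c] (by simp)]
      simp [altScan, hb, hc, altScan_phase1 rest hr 0]

lemma isIn_single (a : Char) (cs : List Char) : PySem.Chars.isIn [a] cs = decide (a ∈ cs) := by
  by_cases h : a ∈ cs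
  · simp only [h, decide_true]
    rw [PySem.Chars.isIn_iff_infix]
    obtain ⟨s, t, rfl⟩ := List.append_of_mem h
    exact ⟨s, t, by simp⟩
  · simp only [h, decide_false]
    rw [PySem.Chars.isIn_eq_false_iff]
    intro hin
    exact h (hin.mem (by simp))

lemma core (cs : List Char) :
    (if cs = [] then false
     else if PySem.Chars.startswith cs ['/'] || PySem.Chars.startswith cs ['.', '/'] || PySem.Chars.startswith cs ['.', '.'] then false
     else if PySem.Chars.isIn ['\\'] cs then false
     else
       let parts := splitSlash [] cs
       decide (parts.length = 2) && parts.all (fun p => !(decide (p = []))))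
    = (if cs.take 2 = ['.', '/'] || cs.take 2 = ['.', '.'] then false
       else altScan cs false 0 0) := by
  cases cs with
  | nil => simp [altScan]
  | cons c rest =>
    by_cases hc : c = '/'
    · subst hc
      simp [PySem.Chars.startswith, List.isPrefixOf, altScan]
    · cases rest with
      | nil =>
        by_cases hbs : c = '\\'
        · simp [PySem.Chars.startswith, List.isPrefixOf, hbs, isIn_single, altScan]
        · simp [PySem.Chars.startswith, List.isPrefixOf, hc, hbs, isIn_single, altScan,
                splitSlash]
      | cons d r2 =>
        by_cases hcd : c = '.'
        · by_cases hd : d = '/' ∨ d = '.'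
          · rcases hd with hd | hd <;>
              simp [PySem.Chars.startswith, List.isPrefixOf, hcd, hd]
          · rw [not_or] at hd
            have hguard : ((c :: d :: r2).take 2 = ['.', '/'] || (c :: d :: r2).take 2 = ['.', '.']) = false := by
              simp [hd.1, hd.2]
            rw [hguard]
            simp only [Bool.false_eq_true, if_false]
            rw [show (if (c :: d :: r2) = [] then false
                 else if PySem.Chars.startswith (c :: d :: r2) ['/'] || PySem.Chars.startswith (c :: d :: r2) ['.', '/'] || PySem.Chars.startswith (c :: d :: r2) ['.', '.'] then false
                 else if PySem.Chars.isIn ['\\'] (c :: d :: r2) then false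
                 else
                   let parts := splitSlash [] (c :: d :: r2)
                   decide (parts.length = 2) && parts.all (fun p => !(decide (p = [])))) =
                (if PySem.Chars.isIn ['\\'] (c :: d :: r2) then false
                 else gS [] (c :: d :: r2)) by
              simp [PySem.Chars.startswith, List.isPrefixOf, hcd, Ne.symm hd.1, Ne.symm hd.2, gS]]
            by_cases hbsl : '\\' ∈ (c :: d :: r2)
            · simp [isIn_single, hbsl, altScan_backslash _ hbsl]
            · simp [isIn_single, hbsl, altScan_eq _ hbsl]
        · have hguard : ((c :: d :: r2).take 2 = ['.', '/'] || (c :: d :: r2).take 2 = ['.', '.']) = false := by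
            simp [hcd]
          rw [hguard]
          simp only [Bool.false_eq_true, if_false]
          rw [show (if (c :: d :: r2) = [] then false
               else if PySem.Chars.startswith (c :: d :: r2) ['/'] || PySem.Chars.startswith (c :: d :: r2) ['.', '/'] || PySem.Chars.startswith (c :: d :: r2) ['.', '.'] then false
               else if PySem.Chars.isIn ['\\'] (c :: d :: r2) then false
               else
                 let parts := splitSlash [] (c :: d :: r2)
                 decide (parts.length = 2) && parts.all (fun p => !(decide (p = [])))) =
              (if PySem.Chars.isIn ['\\'] (c :: d :: r2) then false
               else gS [] (c :: d :: r2)) by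
            simp [PySem.Chars.startswith, List.isPrefixOf, Ne.symm hc, Ne.symm hcd, gS]]
          by_cases hbsl : '\\' ∈ (c :: d :: r2)
          · simp [isIn_single, hbsl, altScan_backslash _ hbsl]
          · simp [isIn_single, hbsl, altScan_eq _ hbsl]

-- ===== VERDICT (by name: the statement is the Claim_ definition above) =====
theorem is_huggingface_hub_id_py_spec : Claim_equal_is_huggingface_hub_id_py := by
  unfold Claim_equal_is_huggingface_hub_id_py
  intro path _
  unfold Spec_is_huggingface_hub_id_py is_huggingface_hub_id_py is_huggingface_hub_id_py_alt
  have h := core path.toList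
  simp only [PySem.Str.startswith, PySem.Str.isIn,
    show ("/" : String).toList = ['/'] from by decide,
    show ("./" : String).toList = ['.', '/'] from by decide,
    show (".." : String).toList = ['.', '.'] from by decide,
    show ("\\" : String).toList = ['\\'] from by decide,
    splitOn_eq_splitSlash,
    show (path = "") ↔ (path.toList = []) from
      ⟨fun hh => by simp [hh], fun hh => String.toList_eq_nil_iff.mp hh⟩]
  exact h
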